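-- pv_equiv track=rewrite | github.com/MrBrantCode/unitest_baseline | mut_generate/mist_train_cf/cf_61645/solution.py | fibo_gcd
-- ===== SOURCE A (Python) =====
-- def fibo_gcd(n):
--     def gcd(a, b):
--         if a == 0:
--             return b
--         return gcd(b % a, a)
--
--     fibNumbers = [0, 1]
--     for i in range(2, n):
--         fibNumbers.append(fibNumbers[i-1] + fibNumbers[i-2])
--
--     gcdPairs = []
--     for i in range(1, n):
--         gcdPairs.append(gcd(fibNumbers[i-1], fibNumbers[i]))
--
--     return gcdPairs
-- ===== SOURCE B (Python) =====
-- def fibo_gcd(n):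
--     # Consecutive Fibonacci numbers are coprime (and gcd(F0, F1) = gcd(0, 1) = 1),
--     # so the answer is simply a list of (n - 1) ones.
--     return [1] * (n - 1)
-- ===== Notes on version B (the rewrite author's own statement) =====
-- stated objective: faster
-- what changed: B replaces the Fibonacci-table build and the per-pair Euclidean gcd recursion by the closed form [1]*(n-1), since consecutive Fibonacci numbers are coprime.
import Mathlib
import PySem

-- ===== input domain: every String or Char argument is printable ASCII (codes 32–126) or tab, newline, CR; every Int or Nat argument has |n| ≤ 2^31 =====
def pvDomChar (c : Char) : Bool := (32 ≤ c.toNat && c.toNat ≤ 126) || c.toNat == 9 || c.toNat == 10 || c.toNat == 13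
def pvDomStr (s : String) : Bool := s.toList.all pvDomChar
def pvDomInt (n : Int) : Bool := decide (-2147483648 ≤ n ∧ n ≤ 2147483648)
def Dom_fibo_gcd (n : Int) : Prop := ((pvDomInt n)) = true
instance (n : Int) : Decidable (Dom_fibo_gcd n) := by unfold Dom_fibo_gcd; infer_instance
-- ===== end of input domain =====

-- B replaces A's Fibonacci-table build and per-pair Euclidean gcd by the closed form
-- [1]*(n-1) (consecutive Fibonacci numbers are coprime): asymptotically faster.


-- ===== PORT A =====
-- termination helper for the Euclidean recursion: |b % a| < |a| when a ≠ 0  (Python mod)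
theorem pvModNatAbsLt (a b : Int) (ha : a ≠ 0) : (PySem.Int.mod b a).natAbs < a.natAbs := by
  rcases lt_or_gt_of_ne ha with h | h
  · have := PySem.Int.mod_neg_bounds b h; omega
  · have h1 := PySem.Int.mod_nonneg b h
    have h2 := PySem.Int.mod_lt b h
    omega

-- inner 'def gcd(a, b)' of A
def pyGcdA (a b : Int) : Int :=
  if h : a = 0 then b
  else pyGcdA (PySem.Int.mod b a) a
termination_by a.natAbs
decreasing_by exact pvModNatAbsLt a b h

def fibo_gcd (n : Int) : List Int :=
  let fibNumbers := (PySem.List.pyRange 2 n 1).foldl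
    (fun fl i => fl ++ [PySem.List.pyGetD fl (i - 1) 0 + PySem.List.pyGetD fl (i - 2) 0])
    [0, 1]
  (PySem.List.pyRange 1 n 1).foldl
    (fun gp i => gp ++ [pyGcdA (PySem.List.pyGetD fibNumbers (i - 1) 0)
                               (PySem.List.pyGetD fibNumbers i 0)])
    []

-- ===== PORT B =====
def fibo_gcd_alt (n : Int) : List Int := List.replicate (n - 1).toNat 1

-- ===== PRECONDITION & SPEC =====
def Spec_fibo_gcd (n : Int) (out : List Int) : Prop := out = fibo_gcd_alt n
instance (n : Int) (out : List Int) : Decidable (Spec_fibo_gcd n out) := by unfold Spec_fibo_gcd; infer_instance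

-- ===== CLAIM (what is proved, stated in full; the proofs are below) =====
def Claim_equal_fibo_gcd : Prop := ∀ (n : Int), Dom_fibo_gcd n → Spec_fibo_gcd n (fibo_gcd n)

-- ===== LEMMAS AND PROOFS =====

-- one Euclidean step preserves the gcd (nonnegative inputs, Lean emod)
theorem gcd_emod_step (a b : Int) (ha : 0 < a) (hb : 0 ≤ b) : Int.gcd (b % a) a = Int.gcd a b := by
  have h1 : (b % a) = ((b.toNat % a.toNat : Nat) : Int) := by
    push_cast [Int.toNat_of_nonneg hb, Int.toNat_of_nonneg ha.le]; ring
  have h2 : a = ((a.toNat : Nat) : Int) := (Int.toNat_of_nonneg ha.le).symm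
  have h3 : b = ((b.toNat : Nat) : Int) := (Int.toNat_of_nonneg hb).symm
  calc Int.gcd (b % a) a = Int.gcd ((b.toNat % a.toNat : Nat) : Int) ((a.toNat : Nat) : Int) := by
        rw [← h1, ← h2]
    _ = Nat.gcd (b.toNat % a.toNat) a.toNat := Int.gcd_natCast_natCast _ _
    _ = Nat.gcd a.toNat b.toNat := (Nat.gcd_rec _ _).symm
    _ = Int.gcd ((a.toNat : Nat) : Int) ((b.toNat : Nat) : Int) := (Int.gcd_natCast_natCast _ _).symm
    _ = Int.gcd a b := by rw [← h2, ← h3]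

-- A's inner gcd computes the mathematical gcd on nonnegative inputs
theorem pyGcdA_eq_gcd (a b : Int) (ha : 0 ≤ a) (hb : 0 ≤ b) :
    pyGcdA a b = (Int.gcd a b : Int) := by
  rw [pyGcdA]
  split_ifs with h
  · subst h; simp [Int.gcd, Int.natAbs_of_nonneg hb]
  · have hpos : 0 < a := lt_of_le_of_ne ha (Ne.symm h)
    have hm := PySem.Int.mod_nonneg b hpos
    rw [pyGcdA_eq_gcd (PySem.Int.mod b a) a hm ha]
    rw [PySem.Int.mod_eq_emod_of_pos hpos, gcd_emod_step a b hpos hb]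
termination_by a.natAbs
decreasing_by exact pvModNatAbsLt a b h

-- the table A's first loop builds is the Fibonacci sequence
theorem fib_table (m : Nat) (hm : 2 ≤ m) :
    (PySem.List.pyRange 2 (m : Int) 1).foldl
      (fun fl i => fl ++ [PySem.List.pyGetD fl (i - 1) 0 + PySem.List.pyGetD fl (i - 2) 0])
      [0, 1]
    = (List.range m).map (fun k => (Nat.fib k : Int)) := by
  induction m with
  | zero => omega
  | succ k ih =>
    rcases Nat.lt_or_ge k 2 with hk | hk
    · interval_cases k
      · omega
      · decide
    · have step : PySem.List.pyRange 2 ((k + 1 : Nat) : Int) 1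
          = PySem.List.pyRange 2 ((k : Nat) : Int) 1 ++ [((k : Nat) : Int)] := by
        push_cast
        exact PySem.List.pyRange_one_succ_right (by exact_mod_cast hk)
      rw [step, List.foldl_append, ih hk]
      simp only [List.foldl]
      have g1 : PySem.List.pyGetD ((List.range k).map (fun j => (Nat.fib j : Int))) ((k : Int) - 1) 0
          = (Nat.fib (k - 1) : Int) := by
        have : ((k : Int) - 1) = ((k - 1 : Nat) : Int) := by omega
        rw [this, PySem.List.pyGetD_natCast]
        simp [List.getD_eq_getElem?_getD, List.getElem?_map, List.getElem?_range (by omega : k - 1 < k)]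
      have g2 : PySem.List.pyGetD ((List.range k).map (fun j => (Nat.fib j : Int))) ((k : Int) - 2) 0
          = (Nat.fib (k - 2) : Int) := by
        have : ((k : Int) - 2) = ((k - 2 : Nat) : Int) := by omega
        rw [this, PySem.List.pyGetD_natCast]
        simp [List.getD_eq_getElem?_getD, List.getElem?_map, List.getElem?_range (by omega : k - 2 < k)]
      rw [g1, g2, List.range_succ, List.map_append]
      simp only [List.map_cons, List.map_nil, List.append_cancel_left_eq]
      have hf : (Nat.fib k : Int) = (Nat.fib (k - 1) : Int) + (Nat.fib (k - 2) : Int) := by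
        have h2 := Nat.fib_add_two (n := k - 2)
        have e : k - 2 + 2 = k := by omega
        have e1 : k - 2 + 1 = k - 1 := by omega
        rw [e, e1] at h2
        rw [h2]; push_cast; ring
      rw [hf]

-- an entry of the Fibonacci table
theorem fib_table_get (m j : Nat) (hj : j < m) :
    PySem.List.pyGetD ((List.range m).map (fun k => (Nat.fib k : Int))) ((j : Nat) : Int) 0
      = (Nat.fib j : Int) := by
  rw [PySem.List.pyGetD_natCast]
  simp [List.getD_eq_getElem?_getD, List.getElem?_map, List.getElem?_range hj]

-- ===== VERDICT (by name: the statement is the Claim_ definition above) =====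
theorem fibo_gcd_spec : Claim_equal_fibo_gcd := by
  intro n _
  unfold Spec_fibo_gcd fibo_gcd fibo_gcd_alt
  by_cases hn : n ≤ 1
  · have h0 : (n - 1).toNat = 0 := by omega
    have hr : PySem.List.pyRange 1 n 1 = [] := by
      rw [PySem.List.pyRange_one, h0]; simp
    simp [hr, h0]
  · have hn : 1 < n := by omega
    have hcast : ((n.toNat : Nat) : Int) = n := Int.toNat_of_nonneg (by omega)
    have hm : 2 ≤ n.toNat := by omega
    have hL : (PySem.List.pyRange 2 n 1).foldl
        (fun fl i => fl ++ [PySem.List.pyGetD fl (i - 1) 0 + PySem.List.pyGetD fl (i - 2) 0])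
        [0, 1] = (List.range n.toNat).map (fun k => (Nat.fib k : Int)) := by
      rw [← hcast]; exact fib_table n.toNat hm
    have hval : ∀ k : Nat, pyGcdA (Nat.fib k : Int) (Nat.fib (k + 1) : Int) = 1 := by
      intro k
      rw [pyGcdA_eq_gcd _ _ (by positivity) (by positivity), Int.gcd_natCast_natCast,
          Nat.Coprime.gcd_eq_one (Nat.fib_coprime_fib_succ k)]
      norm_num
    rw [hL, PySem.List.foldl_append_singleton_eq_map, PySem.List.pyRange_one, List.map_map]
    rw [List.map_congr_left (fun k hk => by
      simp only [Function.comp]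
      have hkN : k < (n - 1).toNat := by simpa using hk
      have e1 : (1 : Int) + (k : Int) - 1 = ((k : Nat) : Int) := by omega
      have e2 : (1 : Int) + (k : Int) = ((k + 1 : Nat) : Int) := by omega
      rw [e1, e2, fib_table_get n.toNat k (by omega), fib_table_get n.toNat (k + 1) (by omega),
          hval k])]
    simp [List.map_const']
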